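-- pv_equiv track=rewrite | github.com/NixOS/nixpkgs | pkgs/tools/networking/maubot/plugins/update.py | next_incomp
-- ===== SOURCE A (Python) =====
-- def next_incomp(ver_s: str) -> str:
--     ver = ver_s.split('.')
--     zero = False
--     for i in range(len(ver)):
--         try:
--             seg = int(ver[i])
--         except ValueError:
--             if zero:
--                 ver = ver[:i]
--                 break
--             continue
--         if zero:
--             ver[i] = '0'
--         elif seg:
--             ver[i] = str(seg + 1)
--             zero = True
--     return '.'.join(ver)
-- ===== SOURCE B (Python) =====
-- def next_incomp(ver_s: str) -> str:
--     # streaming character scan: never builds the segment list, emits output as it goes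
--     chars = iter(ver_s + '.')
--     out = ''
--     sep = ''
--     buf = ''
--     for ch in chars:                      # phase 1: copy segments until the pivot
--         if ch != '.':
--             buf += ch
--             continue
--         try:
--             v = int(buf)
--         except ValueError:
--             v = None
--         if v:
--             out += sep + str(v + 1)
--             break
--         out += sep + buf
--         sep = '.'
--         buf = ''
--     else:
--         return out
--     buf = ''
--     for ch in chars:                      # phase 2: zero following int segments, stop at a non-int
--         if ch != '.':
--             buf += ch
--             continue
--         try:
--             int(buf)
--         except ValueError:
--             return out
--         out += '.0'
--         buf = ''
--     return out
-- ===== Notes on version B (the rewrite author's own statement) =====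
-- stated objective: alternative
-- what changed: A splits the string into a list of segments and mutates that list in place inside an index loop with a flag before re-joining; B never builds the segment list: it makes one streaming scan over the characters (with a sentinel separator appended), buffering the current segment and emitting the output string incrementally in two staged loops (copy-until-pivot, then zero-following-ints).
import Mathlib
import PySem

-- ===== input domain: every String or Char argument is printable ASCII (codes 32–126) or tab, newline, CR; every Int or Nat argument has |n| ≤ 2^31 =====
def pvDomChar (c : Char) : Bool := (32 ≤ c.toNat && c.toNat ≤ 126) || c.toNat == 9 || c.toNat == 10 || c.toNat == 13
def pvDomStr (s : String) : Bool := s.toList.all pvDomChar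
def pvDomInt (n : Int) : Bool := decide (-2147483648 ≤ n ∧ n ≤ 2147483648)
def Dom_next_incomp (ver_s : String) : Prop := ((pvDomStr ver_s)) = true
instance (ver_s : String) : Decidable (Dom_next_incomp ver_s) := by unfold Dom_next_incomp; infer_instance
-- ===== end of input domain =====

-- B replaces A's split/mutate-in-place/join over a segment list by a single streaming scan over the characters that never builds the segment list (objective: alternative, same cost).

-- ===== PORT A =====
-- the for-loop over range(len(ver)) with in-place updates and break
def next_incomp_loop (ver : List String) (i : Nat) (zero : Bool) : List String :=
  if h : i < ver.length then
    match PySem.Int.ofStr? ver[i] with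
    | none =>
        if zero then ver.take i else next_incomp_loop ver (i + 1) zero
    | some seg =>
        if zero then next_incomp_loop (ver.set i "0") (i + 1) zero
        else if seg ≠ 0 then next_incomp_loop (ver.set i (PySem.Int.toStr (seg + 1))) (i + 1) true
        else next_incomp_loop ver (i + 1) zero
  else ver
termination_by ver.length - i
decreasing_by all_goals simp_all; omega

def next_incomp (ver_s : String) : String :=
  PySem.Str.join "." (next_incomp_loop ((PySem.Str.split? ver_s ".").getD []) 0 false)

-- ===== PORT B =====
-- Source B's second loop: zero out following int segments, stop at the first non-int (buf is the segment buffer)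
def pvB2 : List Char → List Char → List Char → List Char
  | [], out, _ => out
  | c :: cs, out, buf =>
      if c ≠ '.' then pvB2 cs out (buf ++ [c])
      else
        match PySem.Int.ofChars? buf with
        | none => out
        | some _ => pvB2 cs (out ++ ['.', '0']) []

-- Source B's first loop: copy segments until the pivot, then break into the second loop
def pvB1 : List Char → List Char → List Char → List Char → List Char
  | [], out, _, _ => out
  | c :: cs, out, sep, buf =>
      if c ≠ '.' then pvB1 cs out sep (buf ++ [c])
      else
        match PySem.Int.ofChars? buf with
        | some v =>
            if v ≠ 0 then pvB2 cs (out ++ sep ++ (PySem.Int.toStr (v + 1)).toList) []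
            else pvB1 cs (out ++ sep ++ buf) ['.'] []
        | none => pvB1 cs (out ++ sep ++ buf) ['.'] []

def next_incomp_alt (ver_s : String) : String :=
  String.ofList (pvB1 (ver_s.toList ++ ['.']) [] [] [])

-- ===== PRECONDITION & SPEC =====
def Spec_next_incomp (ver_s : String) (out : String) : Prop := out = next_incomp_alt ver_s
instance (ver_s : String) (out : String) : Decidable (Spec_next_incomp ver_s out) := by unfold Spec_next_incomp; infer_instance

-- ===== CLAIM (what is proved, stated in full; the proofs are below) =====
def Claim_equal_next_incomp : Prop := ∀ (ver_s : String), Dom_next_incomp ver_s → Spec_next_incomp ver_s (next_incomp ver_s)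

-- ===== LEMMAS AND PROOFS =====

-- ---- segment-level description of A's loop ----
def segZeroTail : List String → List String
  | [] => []
  | s :: rest =>
      match PySem.Int.ofStr? s with
      | none => []
      | some _ => "0" :: segZeroTail rest

def segPhase1 : List String → List String
  | [] => []
  | s :: rest =>
      match PySem.Int.ofStr? s with
      | none => s :: segPhase1 rest
      | some v => if v ≠ 0 then PySem.Int.toStr (v + 1) :: segZeroTail rest else s :: segPhase1 rest

theorem next_incomp_loop_true (todo done : List String) :
    next_incomp_loop (done ++ todo) done.length true = done ++ segZeroTail todo := by
  induction todo generalizing done with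
  | nil =>
      rw [next_incomp_loop]
      simp [segZeroTail]
  | cons s rest ih =>
      rw [next_incomp_loop]
      have hlt : done.length < (done ++ s :: rest).length := by simp
      have hget : (done ++ s :: rest)[done.length] = s := by
        simp
      rw [dif_pos hlt]
      simp only [hget]
      cases hp : PySem.Int.ofStr? s with
      | none => simp [segZeroTail, hp]
      | some v =>
          simp only []
          have hset : (done ++ s :: rest).set done.length "0" = (done ++ ["0"]) ++ rest := by
            simp
          have hlen : done.length + 1 = (done ++ ["0"]).length := by simp
          rw [hset, hlen, ih]
          simp [segZeroTail, hp]

theorem next_incomp_loop_false (todo done : List String) :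
    next_incomp_loop (done ++ todo) done.length false = done ++ segPhase1 todo := by
  induction todo generalizing done with
  | nil =>
      rw [next_incomp_loop]
      simp [segPhase1]
  | cons s rest ih =>
      rw [next_incomp_loop]
      have hlt : done.length < (done ++ s :: rest).length := by simp
      have hget : (done ++ s :: rest)[done.length] = s := by simp
      rw [dif_pos hlt]
      simp only [hget]
      cases hp : PySem.Int.ofStr? s with
      | none =>
          have h1 : done ++ s :: rest = (done ++ [s]) ++ rest := by simp
          have h2 : done.length + 1 = (done ++ [s]).length := by simp
          simp only [if_neg (Bool.false_ne_true), h1, h2, ih]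
          simp [segPhase1, hp]
      | some v =>
          simp only [Bool.false_eq_true, if_false]
          by_cases hv : v ≠ 0
          · rw [if_pos hv]
            have hset : (done ++ s :: rest).set done.length (PySem.Int.toStr (v + 1))
                = (done ++ [PySem.Int.toStr (v + 1)]) ++ rest := by
              simp
            have hlen : done.length + 1 = (done ++ [PySem.Int.toStr (v + 1)]).length := by simp
            rw [hset, hlen, next_incomp_loop_true]
            simp [segPhase1, hp, hv]
          · rw [if_neg hv]
            have h1 : done ++ s :: rest = (done ++ [s]) ++ rest := by simp
            have h2 : done.length + 1 = (done ++ [s]).length := by simp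
            rw [h1, h2, ih]
            simp [segPhase1, hp]
            simp at hv
            simp [hv]

-- ---- splitting on '.' as a structural recursion ----
def segsOf : List Char → List Char → List (List Char)
  | buf, [] => [buf]
  | buf, c :: rest => if c = '.' then buf :: segsOf [] rest else segsOf (buf ++ [c]) rest

theorem go_nil (fuel : Nat) (cur : List Char) (acc : List (List Char)) :
    PySem.Chars.splitOn.go ['.'] fuel [] cur acc = acc.reverse ++ [cur.reverse] := by
  cases fuel <;> (rw [PySem.Chars.splitOn.go.eq_def]; simp)

theorem go_dot (f : Nat) (rest cur : List Char) (acc : List (List Char)) :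
    PySem.Chars.splitOn.go ['.'] (f + 1) ('.' :: rest) cur acc
      = PySem.Chars.splitOn.go ['.'] f rest [] (cur.reverse :: acc) := by
  rw [PySem.Chars.splitOn.go.eq_def]
  simp [List.isPrefixOf]

theorem go_other (f : Nat) (c : Char) (rest cur : List Char) (acc : List (List Char)) (h : c ≠ '.') :
    PySem.Chars.splitOn.go ['.'] (f + 1) (c :: rest) cur acc
      = PySem.Chars.splitOn.go ['.'] f rest (c :: cur) acc := by
  rw [PySem.Chars.splitOn.go.eq_def]
  simp only [List.isPrefixOf, Bool.and_true]
  rw [if_neg (by simp; exact fun hh => absurd hh.symm h)]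

theorem splitOn_go_eq (l : List Char) (fuel : Nat) (cur : List Char) (acc : List (List Char))
    (h : l.length ≤ fuel) :
    PySem.Chars.splitOn.go ['.'] fuel l cur acc = acc.reverse ++ segsOf cur.reverse l := by
  induction l generalizing fuel cur acc with
  | nil => rw [go_nil]; simp [segsOf]
  | cons c rest ih =>
      cases fuel with
      | zero => simp at h
      | succ f =>
          simp only [List.length_cons, Nat.add_le_add_iff_right] at h
          by_cases hc : c = '.'
          · subst hc
            rw [go_dot, ih f [] (cur.reverse :: acc) h]
            simp [segsOf]
          · rw [go_other f c rest cur acc hc, ih f (c :: cur) acc h]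
            simp [segsOf, hc]

theorem splitOn_dot (cs : List Char) :
    PySem.Chars.splitOn cs ['.'] = segsOf [] cs := by
  unfold PySem.Chars.splitOn
  rw [splitOn_go_eq cs (cs.length + 1) [] [] (by omega)]
  simp

theorem segsOf_ne_nil (buf cs : List Char) : segsOf buf cs ≠ [] := by
  induction cs generalizing buf with
  | nil => simp [segsOf]
  | cons c rest ih =>
      unfold segsOf
      by_cases hc : c = '.' <;> simp [hc, ih]

-- ---- what B's two loops emit, segment by segment ----
def cZT : List (List Char) → List (List Char)
  | [] => []
  | g :: rest =>
      match PySem.Int.ofChars? g with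
      | none => []
      | some _ => ['0'] :: cZT rest

def cP1 : List (List Char) → List (List Char)
  | [] => []
  | g :: rest =>
      match PySem.Int.ofChars? g with
      | none => g :: cP1 rest
      | some v => if v ≠ 0 then (PySem.Int.toStr (v + 1)).toList :: cZT rest else g :: cP1 rest

def emit2 : List (List Char) → List Char
  | [] => []
  | g :: rest =>
      match PySem.Int.ofChars? g with
      | none => []
      | some _ => '.' :: '0' :: emit2 rest

def emit1 (sep : List Char) : List (List Char) → List Char
  | [] => []
  | g :: rest =>
      match PySem.Int.ofChars? g with
      | some v =>
          if v ≠ 0 then sep ++ (PySem.Int.toStr (v + 1)).toList ++ emit2 rest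
          else sep ++ g ++ emit1 ['.'] rest
      | none => sep ++ g ++ emit1 ['.'] rest

theorem pvB2_eq (s out buf : List Char) :
    pvB2 (s ++ ['.']) out buf = out ++ emit2 (segsOf buf s) := by
  induction s generalizing out buf with
  | nil => cases hp : PySem.Int.ofChars? buf <;> simp [pvB2, segsOf, emit2, hp]
  | cons c rest ih =>
      by_cases hc : c = '.'
      · subst hc
        cases hp : PySem.Int.ofChars? buf <;> simp [pvB2, segsOf, emit2, hp, ih]
      · simp [pvB2, segsOf, hc, ih]

theorem pvB1_eq (s out sep buf : List Char) :
    pvB1 (s ++ ['.']) out sep buf = out ++ emit1 sep (segsOf buf s) := by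
  induction s generalizing out sep buf with
  | nil =>
      cases hp : PySem.Int.ofChars? buf with
      | none => simp [pvB1, segsOf, emit1, hp]
      | some v =>
          by_cases hv : v ≠ 0
          · simp [pvB1, pvB2, segsOf, emit1, emit2, hp, hv]
          · simp only [ne_eq, not_not] at hv
            subst hv
            simp [pvB1, segsOf, emit1, hp]
  | cons c rest ih =>
      by_cases hc : c = '.'
      · subst hc
        cases hp : PySem.Int.ofChars? buf with
        | none => simp [pvB1, segsOf, emit1, hp, ih]
        | some v =>
            by_cases hv : v ≠ 0
            · simp [pvB1, segsOf, emit1, hp, hv, pvB2_eq]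
            · simp only [ne_eq, not_not] at hv
              subst hv
              simp [pvB1, segsOf, emit1, hp, ih]
      · simp [pvB1, segsOf, hc, ih]

-- ---- the emitted characters are the '.'-join of the segment-level result ----
theorem intercalate_cZT (x : List Char) (gs : List (List Char)) :
    List.intercalate ['.'] (x :: cZT gs) = x ++ emit2 gs := by
  induction gs generalizing x with
  | nil => simp [cZT, emit2, List.intercalate]
  | cons g rest ih =>
      cases hp : PySem.Int.ofChars? g with
      | none => simp [cZT, emit2, hp, List.intercalate]
      | some v =>
          simp only [cZT, emit2, hp]
          rw [show List.intercalate ['.'] (x :: ['0'] :: cZT rest)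
              = x ++ ['.'] ++ List.intercalate ['.'] (['0'] :: cZT rest) by
            simp [List.intercalate, List.intersperse]]
          rw [ih]
          simp

theorem cP1_ne_nil (gs : List (List Char)) (h : gs ≠ []) : cP1 gs ≠ [] := by
  cases gs with
  | nil => exact absurd rfl h
  | cons g rest =>
      unfold cP1
      cases hp : PySem.Int.ofChars? g with
      | none => simp
      | some v => by_cases hv : v ≠ 0 <;> simp [hv]

theorem emit1_eq_intercalate (gs : List (List Char)) (sep : List Char) (h : gs ≠ []) :
    emit1 sep gs = sep ++ List.intercalate ['.'] (cP1 gs) := by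
  induction gs generalizing sep with
  | nil => exact absurd rfl h
  | cons g rest ih =>
      have copy : ∀ (sep : List Char),
          sep ++ g ++ emit1 ['.'] rest = sep ++ List.intercalate ['.'] (g :: cP1 rest) := by
        intro sep
        cases hr : rest with
        | nil => simp [emit1, cP1, List.intercalate]
        | cons r rs =>
            subst hr
            rw [ih ['.'] (by simp)]
            obtain ⟨y, ys, hy⟩ : ∃ y ys, cP1 (r :: rs) = y :: ys := by
              rcases hcp : cP1 (r :: rs) with _ | ⟨y, ys⟩
              · exact absurd hcp (cP1_ne_nil (r :: rs) (by simp))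
              · exact ⟨y, ys, rfl⟩
            rw [hy, show List.intercalate ['.'] (g :: y :: ys)
                = g ++ ['.'] ++ List.intercalate ['.'] (y :: ys) by
              simp [List.intercalate, List.intersperse]]
            simp
      cases hp : PySem.Int.ofChars? g with
      | none => simpa [emit1, cP1, hp] using copy sep
      | some v =>
          by_cases hv : v ≠ 0
          · simp only [emit1, cP1, hp, if_pos hv]
            rw [intercalate_cZT]
            simp
          · simpa [emit1, cP1, hp, hv] using copy sep

-- ---- bridge between the String-level segment machine (A side) and the char-level one ----
theorem segZeroTail_map (gs : List (List Char)) :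
    segZeroTail (gs.map String.ofList) = (cZT gs).map String.ofList := by
  induction gs with
  | nil => simp [segZeroTail, cZT]
  | cons g rest ih =>
      have h : PySem.Int.ofStr? (String.ofList g) = PySem.Int.ofChars? g := by
        simp [PySem.Int.ofStr?]
      have h0 : ("0" : String) = String.ofList ['0'] := rfl
      cases hp : PySem.Int.ofChars? g <;> simp [segZeroTail, cZT, h, hp, ih, h0]

theorem segPhase1_map (gs : List (List Char)) :
    segPhase1 (gs.map String.ofList) = (cP1 gs).map String.ofList := by
  induction gs with
  | nil => simp [segPhase1, cP1]
  | cons g rest ih =>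
      have h : PySem.Int.ofStr? (String.ofList g) = PySem.Int.ofChars? g := by
        simp [PySem.Int.ofStr?]
      cases hp : PySem.Int.ofChars? g with
      | none => simp [segPhase1, cP1, h, hp, ih]
      | some v =>
          by_cases hv : v ≠ 0
          · simp [segPhase1, cP1, h, hp, hv, segZeroTail_map, PySem.Int.toStr]
          · simp only [ne_eq, not_not] at hv
            subst hv
            simp [segPhase1, cP1, h, hp, ih]

-- ===== VERDICT (by name: the statement is the Claim_ definition above) =====
theorem next_incomp_spec : Claim_equal_next_incomp := by
  intro ver_s _
  unfold Spec_next_incomp next_incomp next_incomp_alt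
  have hsplit : (PySem.Str.split? ver_s ".").getD []
      = (segsOf [] ver_s.toList).map String.ofList := by
    simp [PySem.Str.split?, PySem.Chars.split?, splitOn_dot]
  have hloop := next_incomp_loop_false ((PySem.Str.split? ver_s ".").getD []) []
  simp only [List.nil_append, List.length_nil] at hloop
  rw [hloop, hsplit, segPhase1_map, pvB1_eq]
  rw [emit1_eq_intercalate _ _ (segsOf_ne_nil [] ver_s.toList)]
  simp only [List.nil_append]
  simp [PySem.Str.join, PySem.Chars.join, List.map_map, Function.comp_def]
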